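-- pv_equiv track=rewrite | github.com/dlsdud9098/git_programmers | level0/120896.py | solution
-- ===== SOURCE A (Python) =====
-- def solution(s):
--     cnt_dict = {}
--     for i in range(len(s)):
--         if s[i] in cnt_dict:
--             cnt_dict[s[i]] += 1
--         else:
--             cnt_dict[s[i]] = 1
--
--     one_s_list = []
--
--     for i, j in cnt_dict.items():
--         if j == 1:
--             one_s_list.append(i)
--
--     one_s_list = sorted(one_s_list)
--     one_s = ''.join(one_s_list)
--     return one_s
-- ===== SOURCE B (Python) =====
-- def solution(s):
--     ss = sorted(s)
--     res = []
--     i = 0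
--     while i < len(ss):
--         j = i + 1
--         while j < len(ss) and ss[j] == ss[i]:
--             j += 1
--         if j == i + 1:
--             res.append(ss[i])
--         i = j
--     return ''.join(res)
-- ===== Notes on version B (the rewrite author's own statement) =====
-- stated objective: alternative
-- what changed: B sorts the characters first and scans the sorted list once grouping consecutive equal runs, emitting each run of length exactly 1, instead of building a frequency dictionary, filtering its items and sorting the survivors.
import Mathlib
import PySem

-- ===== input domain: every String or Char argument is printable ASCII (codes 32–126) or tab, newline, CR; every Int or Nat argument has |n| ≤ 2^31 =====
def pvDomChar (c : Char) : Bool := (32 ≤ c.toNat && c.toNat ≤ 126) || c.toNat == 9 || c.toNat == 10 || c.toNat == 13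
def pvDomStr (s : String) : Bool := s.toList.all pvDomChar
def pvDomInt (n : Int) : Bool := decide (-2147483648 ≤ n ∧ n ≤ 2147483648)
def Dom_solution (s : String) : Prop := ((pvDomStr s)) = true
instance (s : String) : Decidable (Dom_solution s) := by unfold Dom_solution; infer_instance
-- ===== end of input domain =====

-- B sorts first and scans runs of equal characters in one pass, instead of A's
-- count-dictionary + filter + sort; alternative decomposition, same asymptotic cost.

-- ===== PORT A =====
def solution (s : String) : String :=
  let cs := s.toList
  let cnt := (PySem.List.pyRange 0 (cs.length : Int) 1).foldl
    (fun d i =>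
      let c := PySem.List.pyGetD cs i ' '
      if d.contains c then d.insert c (d.getD c 0 + 1) else d.insert c (1 : Int))
    PySem.Dict.empty
  let oneList := cnt.items.foldl
    (fun acc p => if p.2 == (1 : Int) then acc ++ [p.1] else acc) []
  String.ofList (PySem.List.sorted oneList (fun x => x) false)

-- ===== PORT B =====
-- run-length scan of the sorted character list (Source B's grouping while-loop)
def collectSingles : List Char → List Char
  | [] => []
  | c :: rest =>
      (if rest.takeWhile (fun x => x == c) = ([] : List Char) then [c] else []) ++
        collectSingles (rest.dropWhile (fun x => x == c))
  termination_by l => l.length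
  decreasing_by
    simpa using Nat.lt_succ_of_le (List.length_dropWhile_le _ rest)

def solution_alt (s : String) : String :=
  String.ofList (collectSingles (PySem.List.sorted s.toList (fun x => x) false))

-- ===== PRECONDITION & SPEC =====
def Spec_solution (s : String) (out : String) : Prop := out = solution_alt s
instance (s : String) (out : String) : Decidable (Spec_solution s out) := by unfold Spec_solution; infer_instance

-- ===== CLAIM (what is proved, stated in full; the proofs are below) =====
def Claim_equal_solution : Prop := ∀ (s : String), Dom_solution s → Spec_solution s (solution s)

-- ===== LEMMAS AND PROOFS =====

-- A's dict loop builds Counter(cs)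
theorem counter_loop_eq (cs : List Char) :
    cs.foldl (fun d c => if d.contains c then d.insert c (d.getD c 0 + 1)
                         else d.insert c (1 : Int)) PySem.Dict.empty
      = PySem.Dict.counter cs := by
  rw [← PySem.Dict.foldl_insert_getD_add_one_eq_counter]
  congr 1
  funext d c
  by_cases hc : d.contains c
  · simp [hc]
  · rw [if_neg hc, PySem.Dict.getD_of_not_contains d 0 (by simpa using hc)]
    norm_num

-- after dropping the leading run of c from a ≤-sorted tail of c, everything is > c
theorem drop_gt {c : Char} : ∀ {rest : List Char},
    rest.Pairwise (· ≤ ·) → (∀ x ∈ rest, c ≤ x) →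
    ∀ x ∈ rest.dropWhile (fun x => x == c), c < x := by
  intro rest
  induction rest with
  | nil => simp
  | cons a l ihl =>
    intro hp hge x hx
    by_cases ha : (a == c) = true
    · rw [List.dropWhile_cons, if_pos ha] at hx
      exact ihl (List.pairwise_cons.mp hp).2 (fun y hy => hge y (List.mem_cons_of_mem _ hy)) x hx
    · rw [List.dropWhile_cons, if_neg ha] at hx
      have hane : a ≠ c := by simpa using ha
      have hac : c < a := lt_of_le_of_ne (hge a (by simp)) (Ne.symm hane)
      rcases List.mem_cons.mp hx with hx | hx
      · exact hx ▸ hac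
      · exact lt_of_lt_of_le hac ((List.pairwise_cons.mp hp).1 x hx)

-- membership in the run scan of a ≤-sorted list: exactly the characters of count 1
theorem mem_collectSingles : ∀ {ss : List Char}, ss.Pairwise (· ≤ ·) → ∀ (x : Char),
    (x ∈ collectSingles ss ↔ x ∈ ss ∧ ss.count x = 1) := by
  intro ss
  induction ss using collectSingles.induct with
  | case1 => simp [collectSingles]
  | case2 c rest ih =>
    intro h x
    have hr : rest.Pairwise (· ≤ ·) := (List.pairwise_cons.mp h).2
    have hge : ∀ y ∈ rest, c ≤ y := (List.pairwise_cons.mp h).1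
    have hgt := drop_gt hr hge
    have hsplit : rest.takeWhile (fun x => x == c) ++ rest.dropWhile (fun x => x == c) = rest :=
      List.takeWhile_append_dropWhile
    have htake : ∀ y ∈ rest.takeWhile (fun x => x == c), y = c := by
      intro y hy
      simpa using List.mem_takeWhile_imp hy
    have h1 : (rest.takeWhile (fun x => x == c)).count c
        = (rest.takeWhile (fun x => x == c)).length := by
      apply List.count_eq_length.mpr
      intro y hy; simp [htake y hy]
    have h2 : (rest.dropWhile (fun x => x == c)).count c = 0 := by
      apply List.count_eq_zero.mpr
      intro hc; exact absurd rfl (ne_of_gt (hgt c hc))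
    have hcnd : rest.count c = (rest.takeWhile (fun x => x == c)).length := by
      conv_lhs => rw [← hsplit]
      rw [List.count_append, h1, h2]
      omega
    have hdp : (rest.dropWhile (fun x => x == c)).Pairwise (· ≤ ·) :=
      hr.sublist (List.dropWhile_sublist _)
    have hiff := ih hdp
    rw [collectSingles]
    by_cases hx : x = c
    · subst hx
      have hnotmem : x ∉ collectSingles (rest.dropWhile (fun y => y == x)) := by
        intro hc
        exact absurd rfl (ne_of_gt (hgt x ((hiff x).mp hc).1))
      constructor
      · intro hm
        rcases List.mem_append.mp hm with hm | hm
        · split at hm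
          · rename_i ht
            refine ⟨by simp, ?_⟩
            simp [List.count_cons_self, hcnd, ht]
          · simp at hm
        · exact absurd hm hnotmem
      · rintro ⟨-, hc1⟩
        rw [List.count_cons_self, hcnd] at hc1
        have : (rest.takeWhile (fun y => y == x)).length = 0 := by omega
        simp [List.length_eq_zero_iff.mp this]
    · have hxtake : x ∉ rest.takeWhile (fun y => y == c) := fun hm => hx (htake x hm)
      have hcnt : (c :: rest).count x = (rest.dropWhile (fun y => y == c)).count x := by
        rw [List.count_cons]
        conv_lhs => rw [← hsplit]
        rw [List.count_append, List.count_eq_zero.mpr hxtake]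
        have hcx : ¬ c = x := fun hh => hx hh.symm
        simp [hcx]
      constructor
      · intro hm
        have hmd : x ∈ collectSingles (rest.dropWhile (fun y => y == c)) := by
          rcases List.mem_append.mp hm with hm | hm
          · exfalso; revert hm; split <;> simp [hx]
          · exact hm
        obtain ⟨hm1, hm2⟩ := (hiff x).mp hmd
        exact ⟨List.mem_cons_of_mem _ ((List.dropWhile_sublist _).subset hm1),
               by rw [hcnt]; exact hm2⟩
      · rintro ⟨hmem, hc1⟩
        rw [hcnt] at hc1
        exact List.mem_append.mpr (Or.inr ((hiff x).mpr
          ⟨List.count_pos_iff.mp (by omega), hc1⟩))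

-- the run scan of a ≤-sorted list is strictly increasing
theorem pairwise_collectSingles : ∀ {ss : List Char}, ss.Pairwise (· ≤ ·) →
    (collectSingles ss).Pairwise (· < ·) := by
  intro ss
  induction ss using collectSingles.induct with
  | case1 => simp [collectSingles]
  | case2 c rest ih =>
    intro h
    have hr : rest.Pairwise (· ≤ ·) := (List.pairwise_cons.mp h).2
    have hge : ∀ y ∈ rest, c ≤ y := (List.pairwise_cons.mp h).1
    have hgt := drop_gt hr hge
    have hdp : (rest.dropWhile (fun x => x == c)).Pairwise (· ≤ ·) :=
      hr.sublist (List.dropWhile_sublist _)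
    rw [collectSingles]
    apply List.pairwise_append.mpr
    refine ⟨by split <;> simp, ih hdp, ?_⟩
    intro a ha b hb
    have hb' : b ∈ rest.dropWhile (fun x => x == c) :=
      ((mem_collectSingles hdp b).mp hb).1
    have hac : a = c := by revert ha; split <;> simp
    exact hac ▸ hgt b hb'

theorem main_eq (s : String) : solution s = solution_alt s := by
  simp only [solution, solution_alt]
  have hfold := PySem.List.foldl_pyRange_pyGetD s.toList ' '
        (fun d c => if d.contains c then d.insert c (d.getD c 0 + 1) else d.insert c (1 : Int))
        PySem.Dict.empty (le_refl 0)
  simp only [Int.toNat_zero, List.drop_zero] at hfold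
  rw [show ((s.toList.length : Int)) = PySem.List.len s.toList from rfl, hfold]
  rw [counter_loop_eq,
      PySem.List.foldl_append_if (fun p => p.2 == (1 : Int)) Prod.fst,
      PySem.Dict.items_counter]
  have honelist :
      List.map Prod.fst (List.filter (fun p => p.2 == (1 : Int))
          (List.map (fun k => (k, ((List.count k s.toList : Int)))) (PySem.Set.ofList s.toList)))
        = (PySem.Set.ofList s.toList).filter (fun k => (List.count k s.toList : Nat) == 1) := by
    rw [List.filter_map, List.map_map]
    have h1 : (Prod.fst ∘ fun k : Char => (k, ((List.count k s.toList : Int)))) = id := by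
      funext k; rfl
    have h2 : ((fun p : Char × Int => p.2 == (1 : Int)) ∘ fun k : Char => (k, ((List.count k s.toList : Int))))
        = fun k => (List.count k s.toList : Nat) == 1 := by
      funext k
      simp [Function.comp]
    rw [h1, h2, List.map_id]
  rw [List.nil_append, honelist]
  congr 1
  have hpw0 : (PySem.List.sorted s.toList (fun x => x) false).Pairwise (· ≤ ·) :=
    PySem.List.sorted_pairwise s.toList (fun x => x)
  apply PySem.List.sorted_eq_of_perm_of_pairwise_lt _ _ (fun x => x) ?_ (pairwise_collectSingles hpw0)
  · apply (List.perm_ext_iff_of_nodup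
      ((pairwise_collectSingles hpw0).imp (fun h => ne_of_lt h))
      (List.Nodup.filter _ (PySem.Set.nodup_ofList s.toList))).mpr
    intro x
    rw [mem_collectSingles hpw0 x, PySem.List.mem_sorted,
        (PySem.List.sorted_perm s.toList (fun x => x) false).count_eq]
    simp [List.mem_filter, PySem.Set.mem_ofList]

-- ===== VERDICT (by name: the statement is the Claim_ definition above) =====
theorem solution_spec : Claim_equal_solution := by
  intro s _
  exact main_eq s
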